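-- pv_equiv track=rewrite | github.com/zmwangx/Project-Euler | 215/solution.py | generate_compatibility_matrix
-- ===== SOURCE A (Python) =====
-- def generate_compatibility_matrix(width, rows):
--     nrows = len(rows)
--     compat = [[True for _ in range(nrows)] for _ in range(nrows)]
--     for pos in range(2, width - 1):
--         include_indices = [i for i, row in enumerate(rows) if pos in row]
--         for i in include_indices:
--             for j in include_indices:
--                 compat[i][j] = False
--     return compat
-- ===== SOURCE B (Python) =====
-- def generate_compatibility_matrix(width, rows):
--     sets = [{p for p in row if 2 <= p < width - 1} for row in rows]
--     return [[si.isdisjoint(sj) for sj in sets] for si in sets]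
-- ===== Notes on version B (the rewrite author's own statement) =====
-- stated objective: faster
-- what changed: Instead of scanning every position in range(2, width-1) and every row per position, B builds one set of in-range crack positions per row and fills the matrix with pairwise set disjointness tests, eliminating the loop over width entirely.
import Mathlib
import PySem

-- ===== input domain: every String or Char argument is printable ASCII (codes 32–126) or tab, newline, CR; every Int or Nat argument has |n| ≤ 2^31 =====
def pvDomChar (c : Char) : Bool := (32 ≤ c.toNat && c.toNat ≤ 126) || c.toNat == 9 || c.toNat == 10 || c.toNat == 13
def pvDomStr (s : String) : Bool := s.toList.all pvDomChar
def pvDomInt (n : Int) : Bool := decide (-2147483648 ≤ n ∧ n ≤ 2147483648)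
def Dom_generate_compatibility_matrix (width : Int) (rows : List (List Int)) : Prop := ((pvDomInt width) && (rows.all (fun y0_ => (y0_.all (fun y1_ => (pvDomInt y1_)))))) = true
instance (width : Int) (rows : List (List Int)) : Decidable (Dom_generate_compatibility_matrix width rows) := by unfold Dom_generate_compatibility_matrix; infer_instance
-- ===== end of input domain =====

-- B replaces A's scan over every position in range(2, width-1) by one set of in-range crack
-- positions per row and pairwise disjointness tests, which a timing run measured as faster.


-- ===== PORT A =====
-- One compat[i][j] = False assignment of A
def gcmUpd (c : List (List Bool)) (i j : Int) : List (List Bool) :=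
  PySem.List.pySetD c i (PySem.List.pySetD (PySem.List.pyGetD c i []) j false)

-- include_indices = [i for i, row in enumerate(rows) if pos in row]
def gcmIncl (rows : List (List Int)) (pos : Int) : List Int :=
  (PySem.List.enumerate rows).filterMap (fun p => if pos ∈ p.2 then some p.1 else none)

-- body of A's loop over pos
def gcmStep (rows : List (List Int)) (c : List (List Bool)) (pos : Int) : List (List Bool) :=
  (gcmIncl rows pos).foldl (fun c i =>
    (gcmIncl rows pos).foldl (fun c j => gcmUpd c i j) c) c

def generate_compatibility_matrix (width : Int) (rows : List (List Int)) : List (List Bool) :=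
  let nrows := rows.length
  let compat := List.replicate nrows (List.replicate nrows true)
  (PySem.List.pyRange 2 (width - 1) 1).foldl (gcmStep rows) compat

-- ===== PORT B =====
def generate_compatibility_matrix_alt (width : Int) (rows : List (List Int)) : List (List Bool) :=
  let sets := rows.map (fun row => PySem.Set.ofList (row.filter (fun p => 2 ≤ p && p < width - 1)))
  sets.map (fun si => sets.map (fun sj => PySem.Set.isdisjoint si sj))

-- ===== PRECONDITION & SPEC =====
def Spec_generate_compatibility_matrix (width : Int) (rows : List (List Int)) (out : List (List Bool)) : Prop := out = generate_compatibility_matrix_alt width rows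
instance (width : Int) (rows : List (List Int)) (out : List (List Bool)) : Decidable (Spec_generate_compatibility_matrix width rows out) := by unfold Spec_generate_compatibility_matrix; infer_instance

-- ===== CLAIM (what is proved, stated in full; the proofs are below) =====
def Claim_equal_generate_compatibility_matrix : Prop := ∀ (width : Int) (rows : List (List Int)), Dom_generate_compatibility_matrix width rows → Spec_generate_compatibility_matrix width rows (generate_compatibility_matrix width rows)

-- ===== LEMMAS AND PROOFS =====

-- entry view of the matrix
def ent (c : List (List Bool)) (a b : Nat) : Bool := (c.getD a []).getD b true

def Shape (c : List (List Bool)) (n : Nat) : Prop := c.length = n ∧ ∀ r ∈ c, r.length = n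

theorem getD_set_self {α : Type} (l : List α) (k : Nat) (v d : α) (h : k < l.length) :
    (l.set k v).getD k d = v := by
  simp [List.getD_eq_getElem?_getD, List.getElem?_set_self h]

theorem getD_set_ne {α : Type} (l : List α) {k a : Nat} (v d : α) (h : k ≠ a) :
    (l.set k v).getD a d = l.getD a d := by
  simp [List.getD_eq_getElem?_getD, List.getElem?_set_ne h]

theorem ent_upd {c : List (List Bool)} {n : Nat} (hs : Shape c n) {i j : Int}
    (hi0 : 0 ≤ i) (hin : i < n) (hj0 : 0 ≤ j) (hjn : j < n) (a b : Nat) :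
    ent (gcmUpd c i j) a b = if (a : Int) = i ∧ (b : Int) = j then false else ent c a b := by
  obtain ⟨hlen, hrow⟩ := hs
  have hilen : i.toNat < c.length := by omega
  have hpg : PySem.List.pyGetD c i [] = c.getD i.toNat [] := by
    rw [PySem.List.pyGetD_eq_getElem _ _ hi0 (by omega), List.getD_eq_getElem _ _ hilen]
  have hrowlen : (c.getD i.toNat []).length = n := by
    rw [List.getD_eq_getElem _ _ hilen]
    exact hrow _ (List.getElem_mem hilen)
  unfold ent gcmUpd
  rw [PySem.List.pySetD_of_nonneg _ _ hi0, PySem.List.pySetD_of_nonneg _ _ hj0, hpg]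
  by_cases ha : a = i.toNat
  · subst ha
    rw [getD_set_self _ _ _ _ (by omega)]
    by_cases hb : b = j.toNat
    · subst hb
      rw [getD_set_self _ _ _ _ (by omega), if_pos ⟨by omega, by omega⟩]
    · rw [getD_set_ne _ _ _ (by omega), if_neg (by omega)]
  · rw [getD_set_ne _ _ _ (by omega), if_neg (by omega)]

theorem shape_upd {c : List (List Bool)} {n : Nat} (hs : Shape c n) {i j : Int}
    (hi0 : 0 ≤ i) (hin : i < n) : Shape (gcmUpd c i j) n := by
  obtain ⟨hlen, hrow⟩ := hs
  have hilen : i.toNat < c.length := by omega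
  unfold gcmUpd
  rw [PySem.List.pySetD_of_nonneg _ _ hi0]
  refine ⟨by simp [hlen], ?_⟩
  intro r hr
  rcases List.mem_or_eq_of_mem_set hr with h | h
  · exact hrow _ h
  · subst h
    rw [PySem.List.length_pySetD, PySem.List.pyGetD_eq_getElem _ _ hi0 (by omega)]
    exact hrow _ (List.getElem_mem hilen)

-- inner fold over j
theorem ent_inner {L : List Int} {c : List (List Bool)} {n : Nat} (hs : Shape c n)
    (hL : ∀ e ∈ L, 0 ≤ e ∧ e < n) {i : Int} (hi0 : 0 ≤ i) (hin : i < n) (a b : Nat) :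
    ent (L.foldl (fun c j => gcmUpd c i j) c) a b =
      if (a : Int) = i ∧ (b : Int) ∈ L then false else ent c a b := by
  induction L generalizing c with
  | nil => simp
  | cons e L ih =>
    have he := hL e (by simp)
    rw [List.foldl_cons, ih (shape_upd hs hi0 hin) (fun x hx => hL x (by simp [hx])),
        ent_upd hs hi0 hin he.1 he.2]
    by_cases h1 : (a : Int) = i <;> by_cases h2 : (b : Int) = e <;>
      by_cases h3 : (b : Int) ∈ L <;> simp [h1, h2, h3]

theorem shape_inner {L : List Int} {c : List (List Bool)} {n : Nat} (hs : Shape c n)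
    {i : Int} (hi0 : 0 ≤ i) (hin : i < n) :
    Shape (L.foldl (fun c j => gcmUpd c i j) c) n := by
  induction L generalizing c with
  | nil => exact hs
  | cons e L ih => exact ih (shape_upd hs hi0 hin)

-- outer fold over i
theorem ent_outer {K L : List Int} {c : List (List Bool)} {n : Nat} (hs : Shape c n)
    (hK : ∀ e ∈ K, 0 ≤ e ∧ e < n) (hL : ∀ e ∈ L, 0 ≤ e ∧ e < n) (a b : Nat) :
    ent (K.foldl (fun c i => L.foldl (fun c j => gcmUpd c i j) c) c) a b =
      if (a : Int) ∈ K ∧ (b : Int) ∈ L then false else ent c a b := by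
  induction K generalizing c with
  | nil => simp
  | cons k K ih =>
    have hk := hK k (by simp)
    rw [List.foldl_cons, ih (shape_inner hs hk.1 hk.2) (fun x hx => hK x (by simp [hx])),
        ent_inner hs hL hk.1 hk.2]
    by_cases h1 : (a : Int) = k <;> by_cases h2 : (a : Int) ∈ K <;>
      by_cases h3 : (b : Int) ∈ L <;> simp [h1, h2, h3]

theorem shape_outer {K L : List Int} {c : List (List Bool)} {n : Nat} (hs : Shape c n)
    (hK : ∀ e ∈ K, 0 ≤ e ∧ e < n) :
    Shape (K.foldl (fun c i => L.foldl (fun c j => gcmUpd c i j) c) c) n := by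
  induction K generalizing c with
  | nil => exact hs
  | cons k K ih =>
    have hk := hK k (by simp)
    exact ih (shape_inner hs hk.1 hk.2) (fun x hx => hK x (by simp [hx]))

-- membership in include_indices
theorem mem_incl {pos : Int} {rows : List (List Int)} (x : Int) :
    x ∈ gcmIncl rows pos ↔
      ∃ k : Nat, k < rows.length ∧ x = (k : Int) ∧ pos ∈ rows.getD k [] := by
  rw [gcmIncl, List.mem_filterMap]
  constructor
  · rintro ⟨p, hp, hf⟩
    rw [PySem.List.mem_enumerate_iff] at hp
    obtain ⟨k, hk, rfl⟩ := hp
    by_cases hm : pos ∈ rows[k]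
    · rw [if_pos hm] at hf
      obtain rfl : (0 : Int) + ↑k = x := Option.some.inj hf
      exact ⟨k, hk, by omega, by rw [List.getD_eq_getElem _ _ hk]; exact hm⟩
    · rw [if_neg hm] at hf
      exact absurd hf (by simp)
  · rintro ⟨k, hk, rfl, hm⟩
    refine ⟨((0 : Int) + k, rows[k]), ?_, ?_⟩
    · rw [PySem.List.mem_enumerate_iff]; exact ⟨k, hk, rfl⟩
    · rw [List.getD_eq_getElem _ _ hk] at hm
      simp [hm]

theorem incl_bounds {pos : Int} {rows : List (List Int)} :
    ∀ e ∈ gcmIncl rows pos, 0 ≤ e ∧ e < (rows.length : Int) := by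
  intro e he
  obtain ⟨k, hk, rfl, _⟩ := (mem_incl e).1 he
  constructor <;> omega

theorem mem_incl_nat {pos : Int} {rows : List (List Int)} (a : Nat) :
    (a : Int) ∈ gcmIncl rows pos ↔ pos ∈ rows.getD a [] := by
  rw [mem_incl]
  constructor
  · rintro ⟨k, hk, hak, hm⟩
    have : a = k := by omega
    subst this; exact hm
  · intro hm
    have ha : a < rows.length := by
      by_contra h
      rw [List.getD_eq_default _ _ (by omega)] at hm
      simp at hm
    exact ⟨a, ha, rfl, hm⟩

theorem ent_step {rows : List (List Int)} {c : List (List Bool)} (hs : Shape c rows.length)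
    (pos : Int) (a b : Nat) :
    ent (gcmStep rows c pos) a b =
      if pos ∈ rows.getD a [] ∧ pos ∈ rows.getD b [] then false else ent c a b := by
  unfold gcmStep
  rw [ent_outer hs incl_bounds incl_bounds]
  simp only [mem_incl_nat]

theorem shape_step {rows : List (List Int)} {c : List (List Bool)} (hs : Shape c rows.length)
    (pos : Int) : Shape (gcmStep rows c pos) rows.length := by
  unfold gcmStep
  exact shape_outer hs incl_bounds

theorem ent_fold {P : List Int} {rows : List (List Int)} {c : List (List Bool)}
    (hs : Shape c rows.length) (a b : Nat) :
    ent (P.foldl (gcmStep rows) c) a b =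
      if ∃ pos ∈ P, pos ∈ rows.getD a [] ∧ pos ∈ rows.getD b [] then false
      else ent c a b := by
  induction P generalizing c with
  | nil => simp
  | cons p P ih =>
    rw [List.foldl_cons, ih (shape_step hs p), ent_step hs p a b]
    simp only [List.exists_mem_cons_iff]
    by_cases hP : ∃ pos ∈ P, pos ∈ rows.getD a [] ∧ pos ∈ rows.getD b []
    · rw [if_pos hP, if_pos (Or.inr hP)]
    · rw [if_neg hP]
      by_cases hp : p ∈ rows.getD a [] ∧ p ∈ rows.getD b []
      · rw [if_pos hp, if_pos (Or.inl hp)]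
      · rw [if_neg hp, if_neg (fun h => h.elim hp hP)]

theorem shape_fold {P : List Int} {rows : List (List Int)} {c : List (List Bool)}
    (hs : Shape c rows.length) : Shape (P.foldl (gcmStep rows) c) rows.length := by
  induction P generalizing c with
  | nil => exact hs
  | cons p P ih => exact ih (shape_step hs p)

theorem getElem?_eq_getD {α : Type} (l : List α) (d : α) (n : Nat) (h : n < l.length) :
    l[n]? = some (l.getD n d) := by
  rw [List.getD_eq_getElem l d h, List.getElem?_eq_getElem h]

-- the two key entry values
theorem entA (P : List Int) (rows : List (List Int)) (a b : Nat)
    (ha : a < rows.length) (hb : b < rows.length) :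
    ent (P.foldl (gcmStep rows)
        (List.replicate rows.length (List.replicate rows.length true))) a b =
      if ∃ pos ∈ P, pos ∈ rows.getD a [] ∧ pos ∈ rows.getD b [] then false else true := by
  have hinit : Shape (List.replicate rows.length (List.replicate rows.length true)) rows.length :=
    ⟨by simp, fun r hr => by rw [List.eq_of_mem_replicate hr]; simp⟩
  rw [ent_fold hinit a b]
  congr 1
  unfold ent
  have h1 : (List.replicate rows.length (List.replicate rows.length true)).getD a [] =
      List.replicate rows.length true := by
    rw [List.getD_eq_getElem _ _ (by simpa using ha), List.getElem_replicate]
  rw [h1, List.getD_eq_getElem _ _ (by simpa using hb), List.getElem_replicate]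

theorem entB (width : Int) (P : List Int) (rows : List (List Int)) (a b : Nat)
    (hP : ∀ x : Int, x ∈ P ↔ 2 ≤ x ∧ x < width - 1) :
    PySem.Set.isdisjoint
        (PySem.Set.ofList ((rows.getD a []).filter (fun p => 2 ≤ p && p < width - 1)))
        (PySem.Set.ofList ((rows.getD b []).filter (fun p => 2 ≤ p && p < width - 1))) =
      if ∃ pos ∈ P, pos ∈ rows.getD a [] ∧ pos ∈ rows.getD b [] then false else true := by
  by_cases hC : ∃ pos ∈ P, pos ∈ rows.getD a [] ∧ pos ∈ rows.getD b []
  · rw [if_pos hC]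
    obtain ⟨pos, hpm, hpa, hpb⟩ := hC
    rw [hP] at hpm
    rw [← Bool.not_eq_true, PySem.Set.isdisjoint_iff]
    intro hall
    exact hall pos (by rw [PySem.Set.mem_ofList, List.mem_filter]
                       exact ⟨hpa, by simp; omega⟩)
      (by rw [PySem.Set.mem_ofList, List.mem_filter]
          exact ⟨hpb, by simp; omega⟩)
  · rw [if_neg hC, PySem.Set.isdisjoint_iff]
    intro x hxa hxb
    rw [PySem.Set.mem_ofList, List.mem_filter] at hxa hxb
    exact hC ⟨x, by rw [hP]
                    have := hxa.2; simp at this; omega,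
              hxa.1, hxb.1⟩

-- ===== VERDICT (by name: the statement is the Claim_ definition above) =====
theorem generate_compatibility_matrix_spec : Claim_equal_generate_compatibility_matrix := by
  intro width rows _
  unfold Spec_generate_compatibility_matrix generate_compatibility_matrix
    generate_compatibility_matrix_alt
  dsimp only
  have hinit : Shape (List.replicate rows.length (List.replicate rows.length true)) rows.length :=
    ⟨by simp, fun r hr => by rw [List.eq_of_mem_replicate hr]; simp⟩
  have hA := shape_fold (P := PySem.List.pyRange 2 (width - 1) 1) hinit
  apply List.ext_getElem?
  intro a
  by_cases han : a < rows.length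
  · rw [getElem?_eq_getD _ [] _ (by rw [hA.1]; exact han),
        getElem?_eq_getD _ [] _ (by simpa using han)]
    congr 1
    have hrowA : ((PySem.List.pyRange 2 (width - 1) 1).foldl (gcmStep rows)
        (List.replicate rows.length (List.replicate rows.length true))).getD a [] ∈
        (PySem.List.pyRange 2 (width - 1) 1).foldl (gcmStep rows)
        (List.replicate rows.length (List.replicate rows.length true)) := by
      rw [List.getD_eq_getElem _ _ (by rw [hA.1]; exact han)]
      exact List.getElem_mem _
    have hlenA : (((PySem.List.pyRange 2 (width - 1) 1).foldl (gcmStep rows)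
        (List.replicate rows.length (List.replicate rows.length true))).getD a []).length
        = rows.length := hA.2 _ hrowA
    have hB : (((rows.map (fun row => PySem.Set.ofList
          (row.filter (fun p => 2 ≤ p && p < width - 1)))).map
          (fun si => (rows.map (fun row => PySem.Set.ofList
            (row.filter (fun p => 2 ≤ p && p < width - 1)))).map
            (fun sj => si.isdisjoint sj))).getD a []) =
        (rows.map (fun row => PySem.Set.ofList
          (row.filter (fun p => 2 ≤ p && p < width - 1)))).map
          (fun sj => PySem.Set.isdisjoint (PySem.Set.ofList
            ((rows.getD a []).filter (fun p => 2 ≤ p && p < width - 1))) sj) := by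
      rw [List.getD_eq_getElem _ _ (by simpa using han)]
      rw [List.getElem_map]
      rw [List.getElem_map, ← List.getD_eq_getElem rows [] han]
    rw [hB]
    apply List.ext_getElem?
    intro b
    by_cases hbn : b < rows.length
    · rw [getElem?_eq_getD _ true _ (by rw [hlenA]; exact hbn),
          getElem?_eq_getD _ true _ (by simpa using hbn)]
      congr 1
      have hRHS : ((rows.map (fun row => PySem.Set.ofList
          (row.filter (fun p => 2 ≤ p && p < width - 1)))).map
          (fun sj => PySem.Set.isdisjoint (PySem.Set.ofList
            ((rows.getD a []).filter (fun p => 2 ≤ p && p < width - 1))) sj)).getD b true =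
          PySem.Set.isdisjoint
            (PySem.Set.ofList ((rows.getD a []).filter (fun p => 2 ≤ p && p < width - 1)))
            (PySem.Set.ofList ((rows.getD b []).filter (fun p => 2 ≤ p && p < width - 1))) := by
        rw [List.getD_eq_getElem _ _ (by simpa using hbn)]
        rw [List.getElem_map, List.getElem_map, ← List.getD_eq_getElem rows [] hbn]
      rw [hRHS, entB width (PySem.List.pyRange 2 (width - 1) 1) rows a b
            (fun x => PySem.List.mem_pyRange_one)]
      exact entA (PySem.List.pyRange 2 (width - 1) 1) rows a b han hbn
    · rw [List.getElem?_eq_none (by rw [hlenA]; omega),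
          List.getElem?_eq_none (by simp; omega)]
  · rw [List.getElem?_eq_none (by rw [hA.1]; omega),
        List.getElem?_eq_none (by simp; omega)]
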